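-- pv_equiv track=rewrite | github.com/aofalcao/mol-activity-annotator | csanno.py | gene_counting
-- ===== SOURCE A (Python) =====
-- def gene_counting(mols, mol_active_genes):
--     #This is where the report is concluded
--     #this is where we count genes
--     genes=[]
--     uniqs=set()
--     for mid in mols:
--         if mid in mol_active_genes:
--             for g in mol_active_genes[mid]:
--                 genes.append(g)
--             uniqs=uniqs | mol_active_genes[mid]
--     gene_counts=[]
--     for g in uniqs: gene_counts.append((genes.count(g), g))
--     gene_counts.sort()
--     gene_counts.reverse()
--     return gene_counts
-- ===== SOURCE B (Python) =====
-- def gene_counting(mols, mol_active_genes):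
--     # Gather all gene occurrences, sort them once, and run-length encode the
--     # sorted list into (count, gene) pairs; finally sort those pairs descending.
--     occ = []
--     for mid in mols:
--         if mid in mol_active_genes:
--             occ.extend(mol_active_genes[mid])
--     occ.sort()
--     pairs = []
--     for g in occ:
--         if pairs and pairs[-1][1] == g:
--             c = pairs[-1][0]
--             pairs[-1] = (c + 1, g)
--         else:
--             pairs.append((1, g))
--     return sorted(pairs, reverse=True)
-- ===== Notes on version B (the rewrite author's own statement) =====
-- stated objective: faster
-- what changed: Replaces A's unique-set bookkeeping plus one genes.count scan per unique gene with a single sort of the occurrence list followed by a run-length-encoding pass that produces the (count, gene) pairs directly, sorted descending at the end.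
import Mathlib
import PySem

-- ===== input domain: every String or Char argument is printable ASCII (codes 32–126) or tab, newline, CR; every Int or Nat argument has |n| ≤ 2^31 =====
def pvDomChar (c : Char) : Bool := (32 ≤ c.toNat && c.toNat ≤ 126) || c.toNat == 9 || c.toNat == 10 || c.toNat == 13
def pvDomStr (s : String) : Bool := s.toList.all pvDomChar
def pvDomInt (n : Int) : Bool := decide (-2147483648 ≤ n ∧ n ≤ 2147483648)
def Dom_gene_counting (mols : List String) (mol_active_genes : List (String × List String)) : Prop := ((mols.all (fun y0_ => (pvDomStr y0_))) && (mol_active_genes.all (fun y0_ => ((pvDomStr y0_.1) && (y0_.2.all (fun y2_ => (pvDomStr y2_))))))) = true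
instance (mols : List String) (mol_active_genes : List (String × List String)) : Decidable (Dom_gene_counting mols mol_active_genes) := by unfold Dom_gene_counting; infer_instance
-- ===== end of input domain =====

-- B replaces A's unique-set bookkeeping plus one genes.count scan per unique gene with a
-- sort of the occurrence list and a single run-length-encoding pass, sorted descending.

-- ===== PORT A =====
-- A: build the flat occurrence list `genes` and the set `uniqs` of genes seen, then
-- (genes.count g, g) per unique gene, sort ascending (tuple order) and reverse.
def gene_counting (mols : List String) (mol_active_genes : List (String × List String)) : List (Int × String) :=
  let d := PySem.Dict.ofList mol_active_genes
  let st := mols.foldl (fun (st : List String × PySem.Set String) mid =>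
      if d.contains mid then
        ((d.getD mid []).foldl (fun genes g => genes ++ [g]) st.1,
         PySem.Set.union st.2 (d.getD mid []))
      else st) ([], PySem.Set.empty)
  let gene_counts := st.2.map (fun g => ((st.1.count g : Int), g))
  (PySem.List.sorted2 gene_counts Prod.fst Prod.snd false).reverse

-- ===== PORT B =====
-- B: collect the occurrences, sort them, run-length encode the sorted list into
-- (count, gene) pairs (the `pairs[-1]` update ports as getLast?/dropLast), sort descending.
def gene_counting_alt (mols : List String) (mol_active_genes : List (String × List String)) : List (Int × String) :=
  let d := PySem.Dict.ofList mol_active_genes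
  let occ := mols.foldl (fun (occ : List String) mid =>
      if d.contains mid then occ ++ d.getD mid [] else occ) []
  let occs := PySem.List.sorted occ (fun g => g) false
  let pairs := occs.foldl (fun (pairs : List (Int × String)) g =>
      match pairs.getLast? with
      | some (c, g') => if g' == g then pairs.dropLast ++ [(c + 1, g)] else pairs ++ [(1, g)]
      | none => [(1, g)]) []
  PySem.List.sorted2 pairs Prod.fst Prod.snd true

-- ===== PRECONDITION & SPEC =====
def Spec_gene_counting (mols : List String) (mol_active_genes : List (String × List String)) (out : List (Int × String)) : Prop := out = gene_counting_alt mols mol_active_genes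
instance (mols : List String) (mol_active_genes : List (String × List String)) (out : List (Int × String)) : Decidable (Spec_gene_counting mols mol_active_genes out) := by unfold Spec_gene_counting; infer_instance

-- ===== CLAIM (what is proved, stated in full; the proofs are below) =====
def Claim_equal_gene_counting : Prop := ∀ (mols : List String) (mol_active_genes : List (String × List String)), Dom_gene_counting mols mol_active_genes → Spec_gene_counting mols mol_active_genes (gene_counting mols mol_active_genes)

-- ===== LEMMAS AND PROOFS =====

-- B's run-length step (the body of B's grouping loop, named for the proofs).
def rleStep (pairs : List (Int × String)) (g : String) : List (Int × String) :=
  match pairs.getLast? with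
  | some (c, g') => if g' == g then pairs.dropLast ++ [(c + 1, g)] else pairs ++ [(1, g)]
  | none => [(1, g)]

-- Run-length encoding of a list, an open run (c, g) in progress.
def runsAux (c : Int) (g : String) : List String → List (Int × String)
  | [] => [(c, g)]
  | x :: t => if x == g then runsAux (c + 1) g t else (c, g) :: runsAux 1 x t

theorem rleStep_ne_nil (s : List (Int × String)) (g : String) : rleStep s g ≠ [] := by
  unfold rleStep
  rcases h : s.getLast? with _ | ⟨c, g'⟩ <;> simp
  split_ifs <;> simp

-- rleStep only looks at the last pair: a fixed nonempty tail commutes with any prefix.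
theorem foldl_rleStep_prefix (l : List String) :
    ∀ (acc s : List (Int × String)), s ≠ [] →
      l.foldl rleStep (acc ++ s) = acc ++ l.foldl rleStep s := by
  induction l with
  | nil => intro acc s _; rfl
  | cons g t ih =>
    intro acc s hs
    rcases s.eq_nil_or_concat with rfl | ⟨s', p, rfl⟩
    · exact absurd rfl hs
    · obtain ⟨c, g'⟩ := p
      simp only [List.concat_eq_append] at hs ⊢
      have hstep : rleStep (acc ++ (s' ++ [(c, g')])) g = acc ++ rleStep (s' ++ [(c, g')]) g := by
        unfold rleStep
        rw [← List.append_assoc, List.getLast?_concat, List.getLast?_concat,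
          List.dropLast_concat, List.dropLast_concat]
        dsimp only
        split_ifs <;> simp
      simp only [List.foldl_cons, hstep]
      exact ih acc _ (rleStep_ne_nil _ _)

-- B's grouping fold, started on an open run, is runsAux.
theorem foldl_rleStep_run (l : List String) :
    ∀ (c : Int) (g : String), l.foldl rleStep [(c, g)] = runsAux c g l := by
  induction l with
  | nil => intro c g; rfl
  | cons x t ih =>
    intro c g
    have hstep : rleStep [(c, g)] x = if g == x then [(c + 1, x)] else [(c, g), (1, x)] := by
      unfold rleStep; rfl
    by_cases hx : x = g
    · subst hx
      simp only [List.foldl_cons, hstep, BEq.rfl, if_true, runsAux, ih]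
    · have h1 : (g == x) = false := by
        have hne : ¬ (g = x) := fun h => hx h.symm
        simpa using hne
      have h2 : (x == g) = false := by simpa using hx
      simp only [List.foldl_cons, hstep, h1, Bool.false_eq_true, if_false, runsAux, h2]
      have := foldl_rleStep_prefix t [(c, g)] [(1, x)] (by simp)
      exact this.trans (by rw [ih 1 x]; rfl)

theorem foldl_rleStep_nil :
    ∀ (l : List String), l.foldl rleStep [] =
      (match l with | [] => [] | x :: t => runsAux 1 x t) := by
  intro l
  cases l with
  | nil => rfl
  | cons x t =>
    have : rleStep [] x = [(1, x)] := rfl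
    simp only [List.foldl_cons, this, foldl_rleStep_run]

-- Membership in the run-length encoding of a sorted tail: exactly the occurrence counts.
theorem mem_runsAux (l : List String) :
    ∀ (c : Int) (g : String), (∀ y ∈ l, g ≤ y) → l.Pairwise (· ≤ ·) →
      ∀ (n : Int) (a : String),
        ((n, a) ∈ runsAux c g l ↔
          (a = g ∧ n = c + (l.count g : Int)) ∨ (a ≠ g ∧ a ∈ l ∧ n = (l.count a : Int))) := by
  induction l with
  | nil => intro c g _ _ n a; simp [runsAux, Prod.ext_iff, eq_comm, And.comm]
  | cons x t ih =>
    intro c g hle hp n a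
    have hpt : t.Pairwise (· ≤ ·) := hp.of_cons
    have hxt : ∀ y ∈ t, x ≤ y := fun y hy => List.rel_of_pairwise_cons hp hy
    by_cases hx : x = g
    · subst hx
      have h2 : (x == x) = true := by simp
      rw [show runsAux c x (x :: t) = runsAux (c + 1) x t by simp [runsAux]]
      rw [ih (c + 1) x hxt hpt n a]
      constructor
      · rintro (⟨rfl, hn⟩ | ⟨ha, hat, hn⟩)
        · exact Or.inl ⟨rfl, by rw [hn]; simp; ring⟩
        · exact Or.inr ⟨ha, List.mem_cons_of_mem _ hat,
            by rw [hn]; simp [Ne.symm ha]⟩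
      · rintro (⟨rfl, hn⟩ | ⟨ha, hat, hn⟩)
        · exact Or.inl ⟨rfl, by rw [hn]; simp; ring⟩
        · refine Or.inr ⟨ha, ?_, ?_⟩
          · rcases List.mem_cons.1 hat with rfl | h
            · exact absurd rfl ha
            · exact h
          · rw [hn]; simp [Ne.symm ha]
    · have hgx : g < x := lt_of_le_of_ne (hle x List.mem_cons_self) (fun h => hx h.symm)
      have hgt : ∀ y ∈ x :: t, g < y := by
        intro y hy
        rcases List.mem_cons.1 hy with rfl | hy'
        · exact hgx
        · exact lt_of_lt_of_le hgx (hxt y hy')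
      have hgmem : g ∉ x :: t := fun h => lt_irrefl g (hgt g h)
      have hcg : (x :: t).count g = 0 := List.count_eq_zero.2 hgmem
      have h2 : (x == g) = false := by simp [hx]
      rw [show runsAux c g (x :: t) = (c, g) :: runsAux 1 x t by simp [runsAux, h2]]
      rw [List.mem_cons, Prod.mk.injEq, ih 1 x hxt hpt n a]
      constructor
      · rintro (⟨hn, ha⟩ | ⟨rfl, hn⟩ | ⟨ha, hat, hn⟩)
        · exact Or.inl ⟨ha, by rw [hn, hcg]; simp⟩
        · refine Or.inr ⟨fun h => lt_irrefl g (h ▸ hgt a List.mem_cons_self), List.mem_cons_self,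
            by rw [hn]; simp; ring⟩
        · refine Or.inr ⟨fun h => lt_irrefl g (h ▸ hgt a (List.mem_cons_of_mem _ hat)),
            List.mem_cons_of_mem _ hat, by rw [hn]; simp [Ne.symm ha]⟩
      · rintro (⟨rfl, hn⟩ | ⟨ha, hat, hn⟩)
        · exact Or.inl ⟨by rw [hn, hcg]; simp, rfl⟩
        · rcases List.mem_cons.1 hat with rfl | hat'
          · exact Or.inr (Or.inl ⟨rfl, by rw [hn]; simp; ring⟩)
          · by_cases hax : a = x
            · subst hax
              exact Or.inr (Or.inl ⟨rfl, by rw [hn]; simp; ring⟩)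
            · exact Or.inr (Or.inr ⟨hax, hat',
                by rw [hn]; simp [Ne.symm hax]⟩)

-- The genes of the run-length encoding are strictly increasing, hence the pairs are nodup.
theorem runsAux_snd_pairwise (l : List String) :
    ∀ (c : Int) (g : String), (∀ y ∈ l, g ≤ y) → l.Pairwise (· ≤ ·) →
      ((runsAux c g l).map Prod.snd).Pairwise (· < ·) ∧
      (∀ a ∈ (runsAux c g l).map Prod.snd, g ≤ a) := by
  induction l with
  | nil => intro c g _ _; simp [runsAux]
  | cons x t ih =>
    intro c g hle hp
    have hpt : t.Pairwise (· ≤ ·) := hp.of_cons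
    have hxt : ∀ y ∈ t, x ≤ y := fun y hy => List.rel_of_pairwise_cons hp hy
    by_cases hx : x = g
    · subst hx
      rw [show runsAux c x (x :: t) = runsAux (c + 1) x t by simp [runsAux]]
      exact ih (c + 1) x hxt hpt
    · have hgx : g < x := lt_of_le_of_ne (hle x List.mem_cons_self) (fun h => hx h.symm)
      have h2 : (x == g) = false := by simp [hx]
      rw [show runsAux c g (x :: t) = (c, g) :: runsAux 1 x t by simp [runsAux, h2]]
      obtain ⟨hpair, hmem⟩ := ih 1 x hxt hpt
      refine ⟨?_, ?_⟩
      · rw [List.map_cons, List.pairwise_cons]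
        exact ⟨fun a ha => lt_of_lt_of_le hgx (hmem a ha), hpair⟩
      · intro a ha
        rw [List.map_cons] at ha
        rcases List.mem_cons.1 ha with rfl | ha'
        · exact le_refl _
        · exact le_of_lt (lt_of_lt_of_le hgx (hmem a ha'))

-- sorted2 with fst/snd keys is sorted with the lexicographic key (Python's tuple order).
theorem sorted2_eq_sorted_toLex (xs : List (Int × String)) (rev : Bool) :
    PySem.List.sorted2 xs Prod.fst Prod.snd rev
      = PySem.List.sorted xs (fun p => toLex p) rev := by
  have hcmp : (fun (a b : Int × String) =>
      decide (a.1 < b.1) || (!decide (b.1 < a.1) && decide (a.2 < b.2)))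
      = fun a b => decide (toLex a < toLex b) := by
    funext a b
    have : (toLex a < toLex b) ↔ (a.1 < b.1 ∨ ¬ b.1 < a.1 ∧ a.2 < b.2) := by
      rw [Prod.Lex.toLex_lt_toLex]
      constructor
      · rintro (h | ⟨h1, h2⟩)
        · exact Or.inl h
        · exact Or.inr ⟨by rw [h1]; exact lt_irrefl _, h2⟩
      · rintro (h | ⟨h1, h2⟩)
        · exact Or.inl h
        · rcases lt_trichotomy a.1 b.1 with h' | h' | h'
          · exact Or.inl h'
          · exact Or.inr ⟨h', h2⟩
          · exact absurd h' h1
    rw [decide_eq_decide.mpr this]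
    simp only [Bool.decide_or, Bool.decide_and, decide_not]
    infer_instance
  cases rev with
  | false =>
    rw [PySem.List.sorted_eq_foldl_insertBy]
    show List.foldl _ [] xs = _
    rw [show (fun (a b : Int × String) =>
        decide (a.1 < b.1) || (!decide (b.1 < a.1) && decide (a.2 < b.2)))
        = fun a b => decide ((fun p : Int × String => toLex p) a < (fun p : Int × String => toLex p) b) from hcmp]
    rfl
  | true =>
    rw [PySem.List.sorted_rev_eq_foldl_insertBy]
    show List.foldl _ [] xs = _
    rw [show (fun (a b : Int × String) =>
        decide (b.1 < a.1) || (!decide (a.1 < b.1) && decide (b.2 < a.2)))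
        = fun a b => decide ((fun p : Int × String => toLex p) b < (fun p : Int × String => toLex p) a) from funext fun a => funext fun b => congrFun (congrFun hcmp b) a]
    rfl

-- On a duplicate-free list the ascending sort reversed is the descending sort.
theorem sorted_reverse_eq_sorted_rev {α κ : Type} [LinearOrder κ] (xs : List α)
    (key : α → κ) (hinj : Function.Injective key) (hnd : xs.Nodup) :
    (PySem.List.sorted xs key false).reverse = PySem.List.sorted xs key true := by
  refine (PySem.List.sorted_rev_eq_of_perm_of_pairwise_gt xs _ key
    ((List.reverse_perm _).trans (PySem.List.sorted_perm xs key false)) ?_).symm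
  rw [List.pairwise_reverse]
  have hnd' : (PySem.List.sorted xs key false).Nodup :=
    ((PySem.List.sorted_perm xs key false).nodup_iff).mpr hnd
  exact ((PySem.List.sorted_pairwise xs key).and hnd').imp
    (fun h => lt_of_le_of_ne h.1 (fun he => h.2 (hinj he)))

-- Loop invariant: A's state is (occurrence list, its set); the list is B's occurrence fold.
theorem gene_counting_loop_inv (d : PySem.Dict String (List String)) :
    ∀ (mols genes : List String),
      (mols.foldl (fun (st : List String × PySem.Set String) mid =>
          if d.contains mid then
            ((d.getD mid []).foldl (fun genes g => genes ++ [g]) st.1,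
             PySem.Set.union st.2 (d.getD mid []))
          else st) (genes, PySem.Set.ofList genes))
        = (mols.foldl (fun (occ : List String) mid =>
            if d.contains mid then occ ++ d.getD mid [] else occ) genes,
           PySem.Set.ofList (mols.foldl (fun (occ : List String) mid =>
            if d.contains mid then occ ++ d.getD mid [] else occ) genes)) := by
  intro mols
  induction mols with
  | nil => intro genes; rfl
  | cons mid rest ih =>
    intro genes
    by_cases h : d.contains mid = true
    · have hg : (d.getD mid []).foldl (fun genes g => genes ++ [g]) genes
          = genes ++ d.getD mid [] := PySem.List.foldl_append_singleton _ _
      have hset : PySem.Set.union (PySem.Set.ofList genes) (d.getD mid [])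
          = PySem.Set.ofList (genes ++ d.getD mid []) :=
        (PySem.Set.ofList_append genes (d.getD mid [])).symm
      simp only [List.foldl_cons, h, if_true, hg, hset]
      exact ih (genes ++ d.getD mid [])
    · simp only [List.foldl_cons, h]
      exact ih genes

-- The heart of the equivalence: for ANY occurrence list, A's count-per-unique-gene list,
-- sorted ascending and reversed, is B's run-length encoding of the sorted list, sorted descending.
theorem counts_eq_rle (occ : List String) :
    (PySem.List.sorted2 ((PySem.Set.ofList occ).map (fun g => ((occ.count g : Int), g)))
        Prod.fst Prod.snd false).reverse
      = PySem.List.sorted2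
          ((PySem.List.sorted occ (fun g => g) false).foldl (fun pairs g => rleStep pairs g) [])
          Prod.fst Prod.snd true := by
  set LA := (PySem.Set.ofList occ).map (fun g => ((occ.count g : Int), g)) with hLA
  have hndA : LA.Nodup :=
    (PySem.Set.nodup_ofList occ).map (fun a b hab => congrArg Prod.snd hab)
  have hmemA : ∀ (n : Int) (a : String),
      ((n, a) ∈ LA ↔ a ∈ occ ∧ n = (occ.count a : Int)) := by
    intro n a
    rw [hLA, List.mem_map]
    constructor
    · rintro ⟨g, hg, heq⟩
      have h1 : ((occ.count g : Int)) = n := congrArg Prod.fst heq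
      have h2 : g = a := congrArg Prod.snd heq
      exact ⟨h2 ▸ (PySem.Set.mem_ofList occ g).1 hg, (h2 ▸ h1).symm⟩
    · rintro ⟨ha, rfl⟩
      exact ⟨a, (PySem.Set.mem_ofList occ a).2 ha, rfl⟩
  rw [sorted2_eq_sorted_toLex, sorted2_eq_sorted_toLex,
    sorted_reverse_eq_sorted_rev LA _ toLex.injective hndA]
  set occs := PySem.List.sorted occ (fun g => g) false with hoccs
  have hperm : occs.Perm occ := PySem.List.sorted_perm occ _ false
  have hsorted : occs.Pairwise (· ≤ ·) := PySem.List.sorted_pairwise occ (fun g => g)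
  have hfold : occs.foldl (fun pairs g => rleStep pairs g) [] = occs.foldl rleStep [] := rfl
  rw [hfold, foldl_rleStep_nil]
  cases hc : occs with
  | nil =>
    have : occ = [] := by
      have := hperm
      rw [hc] at this
      exact (List.Perm.nil_eq this).symm
    subst this
    rfl
  | cons x t =>
    rw [hc] at hsorted hperm
    have hxt : ∀ y ∈ t, x ≤ y := fun y hy => List.rel_of_pairwise_cons hsorted hy
    have hpt : t.Pairwise (· ≤ ·) := hsorted.of_cons
    set LB := runsAux 1 x t with hLB
    have hmemB : ∀ (n : Int) (a : String),
        ((n, a) ∈ LB ↔ a ∈ occ ∧ n = (occ.count a : Int)) := by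
      intro n a
      rw [hLB, mem_runsAux t 1 x hxt hpt n a]
      have hcnt : ∀ b : String, occ.count b = (x :: t).count b :=
        fun b => (hperm.count_eq b).symm
      have hmem : ∀ b : String, b ∈ occ ↔ b ∈ x :: t := fun b => hperm.mem_iff.symm
      constructor
      · rintro (⟨rfl, hn⟩ | ⟨ha, hat, hn⟩)
        · refine ⟨(hmem a).2 List.mem_cons_self, ?_⟩
          rw [hn, hcnt a]; simp; ring
        · refine ⟨(hmem a).2 (List.mem_cons_of_mem _ hat), ?_⟩
          rw [hn, hcnt a]; simp [Ne.symm ha]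
      · rintro ⟨ha, rfl⟩
        by_cases hax : a = x
        · subst hax
          refine Or.inl ⟨rfl, ?_⟩
          rw [hcnt a]; simp; ring
        · refine Or.inr ⟨hax, ?_, ?_⟩
          · rcases List.mem_cons.1 ((hmem a).1 ha) with rfl | h
            · exact absurd rfl hax
            · exact h
          · rw [hcnt a]; simp [Ne.symm hax]
    have hndB : LB.Nodup := by
      have hsnd := (runsAux_snd_pairwise t 1 x hxt hpt).1
      have hm : ((runsAux 1 x t).map Prod.snd).Nodup := hsnd.imp (fun h => ne_of_lt h)
      exact hm.of_map
    have hpermAB : LB.Perm LA := by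
      rw [List.perm_ext_iff_of_nodup hndB hndA]
      rintro ⟨n, a⟩
      rw [hmemA n a, hmemB n a]
    have hfin : PySem.List.sorted LA (fun p : Int × String => toLex p) true
        = PySem.List.sorted LB (fun p : Int × String => toLex p) true := by
      refine (PySem.List.sorted_rev_eq_of_perm_of_pairwise_gt LA
        (PySem.List.sorted LB (fun p : Int × String => toLex p) true) (fun p : Int × String => toLex p)
        ((PySem.List.sorted_perm LB _ true).trans hpermAB) ?_)
      have hnd' : (PySem.List.sorted LB (fun p : Int × String => toLex p) true).Nodup :=
        ((PySem.List.sorted_perm LB _ true).nodup_iff).mpr hndB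
      exact ((PySem.List.sorted_pairwise_rev LB (fun p : Int × String => toLex p)).and hnd').imp
        (fun h => lt_of_le_of_ne h.1 (fun he => h.2 (toLex.injective he.symm)))
    exact hfin

-- ===== VERDICT (by name: the statement is the Claim_ definition above) =====
theorem gene_counting_spec : Claim_equal_gene_counting := by
  intro mols mol_active_genes _
  unfold Spec_gene_counting
  simp only [gene_counting, gene_counting_alt]
  have h := gene_counting_loop_inv (PySem.Dict.ofList mol_active_genes) mols []
  simp only [show PySem.Set.ofList ([] : List String) = PySem.Set.empty from rfl] at h
  rw [h]
  exact counts_eq_rle _
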